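-- pv_equiv track=rewrite | github.com/openhealthcare/rbhl | legacy/build_lookup_list.py | get_distinct_count
-- ===== SOURCE A (Python) =====
-- from collections import defaultdict
--
-- def get_distinct_count(case_sensitive_count):
--     """
--     Returns a case insensitive count, keyed
--     by the most popular case sensitive value
--     Takes in e.g. {
--         Horse: 10,
--         Cat 11,
--         horse: 3
--     }
--
--     return {
--         Horse: 13,
--         Cat: 11
--     }
--     """
--     as_tuple = case_sensitive_count.items()
--     case_insensitive_count = defaultdict(int)
--
--     for k, v in as_tuple:
--         case_insensitive_count[k.lower()] += v
--
--     by_popularity = sorted(as_tuple, key=lambda x: x[1], reverse=True)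
--     result = {}
--     seen = set()
--     for case_sensitive_value, _ in by_popularity:
--         lower_case = case_sensitive_value.lower()
--         if lower_case in seen:
--             continue
--         seen.add(lower_case)
--         result[case_sensitive_value] = case_insensitive_count[lower_case]
--     return result
-- ===== SOURCE B (Python) =====
-- def get_distinct_count(case_sensitive_count):
--     # one aggregation pass: lowercased value -> [total, best_count, best_index, best_key]
--     groups = {}
--     for i, (k, v) in enumerate(case_sensitive_count.items()):
--         lc = k.lower()
--         g = groups.get(lc)
--         if g is None:
--             groups[lc] = [v, v, i, k]
--         else:
--             g[0] += v
--             if v > g[1]: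
--                 g[1] = v
--                 g[2] = i
--                 g[3] = k
--     ordered = sorted(groups.values(), key=lambda g: (-g[1], g[2]))
--     return {g[3]: g[0] for g in ordered}
-- ===== Notes on version B (the rewrite author's own statement) =====
-- stated objective: alternative
-- what changed: Replaces A's full sort of all items plus seen-set dedup scan with a single aggregation pass keyed by lowercased value that tracks (total, best_count, best_index, best_key) per group, followed by a sort of only the group records by (-best_count, best_index).
import Mathlib
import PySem

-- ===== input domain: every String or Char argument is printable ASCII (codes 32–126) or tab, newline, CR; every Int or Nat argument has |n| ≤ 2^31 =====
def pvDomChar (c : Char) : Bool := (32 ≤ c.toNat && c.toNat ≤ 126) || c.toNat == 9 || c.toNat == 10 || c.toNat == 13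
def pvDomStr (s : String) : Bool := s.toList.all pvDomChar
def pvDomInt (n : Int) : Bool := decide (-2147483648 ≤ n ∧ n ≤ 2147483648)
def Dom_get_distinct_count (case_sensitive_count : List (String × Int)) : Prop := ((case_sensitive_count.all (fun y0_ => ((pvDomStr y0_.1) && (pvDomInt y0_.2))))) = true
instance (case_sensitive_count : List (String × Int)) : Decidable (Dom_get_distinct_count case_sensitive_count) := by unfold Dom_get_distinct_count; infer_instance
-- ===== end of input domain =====

-- B replaces the sort-everything-then-dedup of A by one grouping pass plus a sort of the group records (alternative decomposition, same results).

-- ===== PORT A =====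
def get_distinct_count (case_sensitive_count : List (String × Int)) : List (String × Int) :=
  let as_tuple := case_sensitive_count
  let case_insensitive_count : PySem.Dict String Int :=
    as_tuple.foldl (fun d kv => d.modify (PySem.Str.lower kv.1) 0 (fun t => t + kv.2)) PySem.Dict.empty
  let by_popularity := PySem.List.sorted as_tuple (fun x => x.2) true
  let final := by_popularity.foldl
    (fun (st : PySem.Dict String Int × PySem.Set String) kv =>
      if PySem.Set.contains st.2 (PySem.Str.lower kv.1) then st
      else (st.1.insert kv.1 (case_insensitive_count.getD (PySem.Str.lower kv.1) 0),
            PySem.Set.add st.2 (PySem.Str.lower kv.1)))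
    (PySem.Dict.empty, PySem.Set.empty)
  final.1.items

-- ===== PORT B =====
def get_distinct_count_alt (case_sensitive_count : List (String × Int)) : List (String × Int) :=
  -- groups : lowercased value -> (total, best_count, best_index, best_key)
  let groups : PySem.Dict String (Int × Int × Int × String) :=
    (PySem.List.enumerate case_sensitive_count 0).foldl
      (fun d p =>
        d.insert (PySem.Str.lower p.2.1)
          (match d.get? (PySem.Str.lower p.2.1) with
           | none => (p.2.2, p.2.2, p.1, p.2.1)
           | some g => (g.1 + p.2.2, if g.2.1 < p.2.2 then (p.2.2, p.1, p.2.1) else g.2)))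
      PySem.Dict.empty
  let ordered := PySem.List.sorted2 (PySem.Dict.values groups) (fun g => -g.2.1) (fun g => g.2.2.1) false
  (ordered.foldl (fun (d : PySem.Dict String Int) g => d.insert g.2.2.2 g.1) PySem.Dict.empty).items

-- ===== PRECONDITION & SPEC =====
-- Pre_ restricts to genuine dict inputs: association lists with pairwise-distinct keys
-- (the Python argument is a dict, which cannot hold duplicate keys).
def Pre_get_distinct_count (case_sensitive_count : List (String × Int)) : Prop :=
  (case_sensitive_count.map Prod.fst).Nodup
instance (case_sensitive_count : List (String × Int)) : Decidable (Pre_get_distinct_count case_sensitive_count) := by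
  unfold Pre_get_distinct_count; infer_instance

def pvWitness_get_distinct_count : (List (String × Int)) := ([("Horse", 10), ("Cat", 11), ("horse", 3)])

def Spec_get_distinct_count (case_sensitive_count : List (String × Int)) (out : List (String × Int)) : Prop := out = get_distinct_count_alt case_sensitive_count
instance (case_sensitive_count : List (String × Int)) (out : List (String × Int)) : Decidable (Spec_get_distinct_count case_sensitive_count out) := by unfold Spec_get_distinct_count; infer_instance

-- ===== CLAIM (what is proved, stated in full; the proofs are below) =====
def Claim_equal_get_distinct_count : Prop := ∀ (case_sensitive_count : List (String × Int)), Dom_get_distinct_count case_sensitive_count → Pre_get_distinct_count case_sensitive_count → Spec_get_distinct_count case_sensitive_count (get_distinct_count case_sensitive_count)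

-- ===== LEMMAS AND PROOFS =====

-- ---- generic lexicographic "before" relation of Python's sorted with a two-component Int key ----
def pvBef {α : Type} (k1 k2 : α → Int) (a b : α) : Bool :=
  decide (k1 a < k1 b) || (!decide (k1 b < k1 a) && decide (k2 a < k2 b))

theorem pvBef_asymm {α : Type} (k1 k2 : α → Int) {a b : α}
    (h : pvBef k1 k2 a b = true) : pvBef k1 k2 b a = false := by
  simp [pvBef] at *; omega

theorem pvBef_trans {α : Type} (k1 k2 : α → Int) {a b c : α}
    (hab : pvBef k1 k2 a b = true) (hbc : pvBef k1 k2 b c = true) : pvBef k1 k2 a c = true := by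
  simp [pvBef] at *; omega

theorem pvBef_total {α : Type} (k1 k2 : α → Int) {a b : α}
    (h : pvBef k1 k2 a b = false) (hne : k2 a ≠ k2 b) : pvBef k1 k2 b a = true := by
  simp [pvBef] at *; omega

theorem pvSorted2_eq_foldl {α : Type} (xs : List α) (k1 k2 : α → Int) :
    PySem.List.sorted2 xs k1 k2 false
      = xs.foldl (fun acc x => PySem.List.insertBy (pvBef k1 k2) x acc) [] := rfl

theorem pvPairwise_insertBy {α : Type} (k1 k2 : α → Int) (x : α) (l : List α)
    (h : l.Pairwise (fun a b => pvBef k1 k2 b a = false)) :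
    (PySem.List.insertBy (pvBef k1 k2) x l).Pairwise (fun a b => pvBef k1 k2 b a = false) := by
  induction l with
  | nil => simp [PySem.List.insertBy]
  | cons y ys ih =>
    rw [PySem.List.insertBy]
    rcases List.pairwise_cons.mp h with ⟨hy, hys⟩
    by_cases hxy : pvBef k1 k2 x y = true
    · rw [if_pos hxy]
      refine List.pairwise_cons.mpr ⟨?_, h⟩
      intro z hz
      rcases List.mem_cons.mp hz with rfl | hz
      · exact pvBef_asymm k1 k2 hxy
      · by_cases hzx : pvBef k1 k2 z x = true
        · have := pvBef_trans k1 k2 hzx hxy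
          have := hy z hz
          simp_all
        · simpa using hzx
    · rw [if_neg hxy]
      refine List.pairwise_cons.mpr ⟨?_, ih hys⟩
      intro z hz
      rcases (PySem.List.mem_insertBy _ _ _ _).mp hz with rfl | hz
      · simpa using hxy
      · exact hy z hz

theorem pvPairwise_foldl_insertBy {α : Type} (k1 k2 : α → Int) :
    ∀ (l : List α) (acc : List α), acc.Pairwise (fun a b => pvBef k1 k2 b a = false) →
      (l.foldl (fun a x => PySem.List.insertBy (pvBef k1 k2) x a) acc).Pairwise
        (fun a b => pvBef k1 k2 b a = false) := by
  intro l
  induction l with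
  | nil => intro acc h; simpa using h
  | cons x t ih => intro acc h; exact ih _ (pvPairwise_insertBy k1 k2 x acc h)

theorem pvSorted2_pairwise {α : Type} (xs : List α) (k1 k2 : α → Int) :
    (PySem.List.sorted2 xs k1 k2 false).Pairwise (fun a b => pvBef k1 k2 b a = false) := by
  rw [pvSorted2_eq_foldl]
  exact pvPairwise_foldl_insertBy k1 k2 xs [] (by simp)

theorem pvSorted2_uniq {α : Type} (xs ys : List α) (k1 k2 : α → Int)
    (hp : ys.Perm xs)
    (hs : ys.Pairwise (fun a b => pvBef k1 k2 a b = true))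
    (hk : ys.Pairwise (fun a b => k2 a ≠ k2 b)) :
    PySem.List.sorted2 xs k1 k2 false = ys := by
  have hperm : (PySem.List.sorted2 xs k1 k2 false).Perm ys :=
    (PySem.List.sorted2_perm xs k1 k2 false).trans hp.symm
  have hkne : (PySem.List.sorted2 xs k1 k2 false).Pairwise (fun a b => k2 a ≠ k2 b) :=
    (hperm.pairwise_iff (fun h => h.symm)).mpr hk
  have hle := pvSorted2_pairwise xs k1 k2
  have hstrict : (PySem.List.sorted2 xs k1 k2 false).Pairwise (fun a b => pvBef k1 k2 a b = true) := by
    refine (hle.and hkne).imp ?_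
    rintro a b ⟨h1, h2⟩
    exact pvBef_total k1 k2 h1 (fun h => h2 h.symm)
  refine List.eq_of_perm_of_sorted ?_ hstrict hs hperm
  intro a b _ _ h1 h2
  have := pvBef_asymm k1 k2 h1
  simp_all

-- ---- enumerate facts ----
theorem pvEnum_nil (i0 : Int) : PySem.List.enumerate ([] : List (String × Int)) i0 = [] := rfl

theorem pvEnum_cons (x : String × Int) (t : List (String × Int)) (i0 : Int) :
    PySem.List.enumerate (x :: t) i0 = (i0, x) :: PySem.List.enumerate t (i0 + 1) := rfl

theorem pvEnum_ge : ∀ (xs : List (String × Int)) (i0 : Int) (p : Int × (String × Int)),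
    p ∈ PySem.List.enumerate xs i0 → i0 ≤ p.1 := by
  intro xs
  induction xs with
  | nil => intro i0 p h; simp [pvEnum_nil] at h
  | cons x t ih =>
    intro i0 p h
    rw [pvEnum_cons] at h
    rcases List.mem_cons.mp h with rfl | h
    · simp
    · have := ih (i0 + 1) p h; omega

theorem pvEnum_pairwise_lt : ∀ (xs : List (String × Int)) (i0 : Int),
    (PySem.List.enumerate xs i0).Pairwise (fun p q => p.1 < q.1) := by
  intro xs
  induction xs with
  | nil => intro i0; simp [pvEnum_nil]
  | cons x t ih =>
    intro i0
    rw [pvEnum_cons]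
    refine List.pairwise_cons.mpr ⟨?_, ih (i0 + 1)⟩
    intro q hq
    have := pvEnum_ge t (i0 + 1) q hq
    simp; omega

theorem pvEnum_filter_map : ∀ (xs : List (String × Int)) (i0 : Int) (c : String),
    (((PySem.List.enumerate xs i0).filter (fun p => PySem.Str.lower p.2.1 == c)).map
        (fun p => p.2.2))
      = ((xs.filter (fun kv => PySem.Str.lower kv.1 == c)).map Prod.snd) := by
  intro xs
  induction xs with
  | nil => intro i0 c; simp [pvEnum_nil]
  | cons x t ih =>
    intro i0 c
    rw [pvEnum_cons]
    by_cases h : PySem.Str.lower x.1 = c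
    · simp [List.filter_cons, h, ih]
    · simp [List.filter_cons, h, ih]

-- ---- stability: A's reverse sort by count = map snd of the indexed lexicographic sort ----
theorem pvMap_snd_insertBy (x : Int × (String × Int)) (acc : List (Int × (String × Int)))
    (h : ∀ p ∈ acc, p.1 < x.1) :
    (PySem.List.insertBy (pvBef (fun p => -p.2.2) (fun p => p.1)) x acc).map Prod.snd
      = PySem.List.insertBy (fun a b => decide (b.2 < a.2)) x.2 (acc.map Prod.snd) := by
  induction acc with
  | nil => simp [PySem.List.insertBy]
  | cons y ys ih =>
    have hy : y.1 < x.1 := h y (by simp)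
    have hb : pvBef (fun p => -p.2.2) (fun p => p.1) x y = decide (y.2.2 < x.2.2) := by
      simp [pvBef]; omega
    by_cases hc : y.2.2 < x.2.2
    · simp [PySem.List.insertBy, hb, hc]
    · simp only [PySem.List.insertBy, hb, hc, decide_false, Bool.false_eq_true, if_false,
        List.map_cons]
      rw [ih (fun p hp => h p (by simp [hp]))]

theorem pvFoldl_enum_insertBy :
    ∀ (xs : List (String × Int)) (i0 : Int) (acc : List (Int × (String × Int))),
      (∀ p ∈ acc, p.1 < i0) →
      ((PySem.List.enumerate xs i0).foldl
          (fun a x => PySem.List.insertBy (pvBef (fun p => -p.2.2) (fun p => p.1)) x a) acc).map Prod.snd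
        = xs.foldl (fun a x => PySem.List.insertBy (fun a b => decide (b.2 < a.2)) x a)
            (acc.map Prod.snd) := by
  intro xs
  induction xs with
  | nil => intro i0 acc h; simp [pvEnum_nil]
  | cons x t ih =>
    intro i0 acc h
    rw [pvEnum_cons]
    simp only [List.foldl_cons]
    have hbnd : ∀ p ∈ PySem.List.insertBy (pvBef (fun p => -p.2.2) (fun p => p.1)) (i0, x) acc,
        p.1 < i0 + 1 := by
      intro p hp
      rcases (PySem.List.mem_insertBy _ _ _ _).mp hp with rfl | hp
      · simp
      · have := h p hp; omega
    rw [ih (i0 + 1) _ hbnd, pvMap_snd_insertBy (i0, x) acc h]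

theorem pvStability (xs : List (String × Int)) :
    PySem.List.sorted xs (fun x => x.2) true
      = (PySem.List.sorted2 (PySem.List.enumerate xs 0) (fun p => -p.2.2) (fun p => p.1) false).map
          Prod.snd := by
  rw [pvSorted2_eq_foldl, pvFoldl_enum_insertBy xs 0 [] (by simp)]
  rw [PySem.List.sorted_rev_eq_foldl_insertBy]
  rfl

-- ---- A side: the case-insensitive totals dict ----
def pvTot (xs : List (String × Int)) (c : String) : Int :=
  ((xs.filter (fun kv => PySem.Str.lower kv.1 == c)).map Prod.snd).sum

theorem pvGetD_foldl_modify :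
    ∀ (l : List (String × Int)) (d : PySem.Dict String Int) (c : String),
      (l.foldl (fun d kv => d.modify (PySem.Str.lower kv.1) 0 (fun t => t + kv.2)) d).getD c 0
        = d.getD c 0 + ((l.filter (fun kv => PySem.Str.lower kv.1 == c)).map Prod.snd).sum := by
  intro l
  induction l with
  | nil => intro d c; simp
  | cons kv t ih =>
    intro d c
    simp only [List.foldl_cons]
    rw [ih]
    rw [PySem.Dict.getD_modify]
    by_cases h : PySem.Str.lower kv.1 = c
    · rw [if_pos h.symm]  -- careful with direction
      simp [List.filter_cons, h]
      ring
    · rw [if_neg (fun hc => h hc.symm)]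
      simp [List.filter_cons, h]

-- ---- first-of-each-class filters ----
def pvFF (seen : PySem.Set String) : List (Int × (String × Int)) → List (Int × (String × Int))
  | [] => []
  | q :: t =>
    if PySem.Set.contains seen (PySem.Str.lower q.2.1) then pvFF seen t
    else q :: pvFF (PySem.Set.add seen (PySem.Str.lower q.2.1)) t

def pvFFs (seen : PySem.Set String) : List (String × Int) → List (String × Int)
  | [] => []
  | kv :: t =>
    if PySem.Set.contains seen (PySem.Str.lower kv.1) then pvFFs seen t
    else kv :: pvFFs (PySem.Set.add seen (PySem.Str.lower kv.1)) t

theorem pvFFs_map_snd : ∀ (l : List (Int × (String × Int))) (seen : PySem.Set String),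
    pvFFs seen (l.map Prod.snd) = (pvFF seen l).map Prod.snd := by
  intro l
  induction l with
  | nil => intro seen; simp [pvFFs, pvFF]
  | cons q t ih =>
    intro seen
    simp only [List.map_cons, pvFFs, pvFF]
    by_cases h : PySem.Set.contains seen (PySem.Str.lower q.2.1) = true
    · rw [if_pos h, if_pos h, ih]
    · rw [if_neg h, if_neg h, List.map_cons, ih]

theorem pvFF_sublist : ∀ (l : List (Int × (String × Int))) (seen : PySem.Set String),
    (pvFF seen l).Sublist l := by
  intro l
  induction l with
  | nil => intro seen; simp [pvFF]
  | cons q t ih =>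
    intro seen
    rw [pvFF]
    by_cases h : PySem.Set.contains seen (PySem.Str.lower q.2.1) = true
    · rw [if_pos h]; exact (ih seen).cons q
    · rw [if_neg h]; exact (ih _).cons₂ q

theorem pvContains_add (s : PySem.Set String) (x y : String) :
    PySem.Set.contains (PySem.Set.add s x) y = (PySem.Set.contains s y || y == x) := by
  by_cases h : y ∈ s.add x
  · rcases (PySem.Set.mem_add s x y).mp h with h1 | rfl
    · simp [PySem.Set.contains, List.contains_iff_mem, h, h1]
    · simp [PySem.Set.contains, List.contains_iff_mem, h]
  · have h1 : ¬ y ∈ s := fun hy => h ((PySem.Set.mem_add s x y).mpr (Or.inl hy))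
    have h2 : y ≠ x := fun hy => h ((PySem.Set.mem_add s x y).mpr (Or.inr hy))
    simp [PySem.Set.contains, List.contains_iff_mem, h, h1, h2]

theorem pvFF_first : ∀ (l : List (Int × (String × Int))) (seen : PySem.Set String)
    (q : Int × (String × Int)), q ∈ pvFF seen l →
    PySem.Set.contains seen (PySem.Str.lower q.2.1) = false ∧
      ∃ l1 l2, l = l1 ++ q :: l2 ∧ ∀ r ∈ l1, PySem.Str.lower r.2.1 ≠ PySem.Str.lower q.2.1 := by
  intro l
  induction l with
  | nil => intro seen q h; simp [pvFF] at h
  | cons x t ih =>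
    intro seen q h
    rw [pvFF] at h
    by_cases hx : PySem.Set.contains seen (PySem.Str.lower x.2.1) = true
    · rw [if_pos hx] at h
      rcases ih seen q h with ⟨hc, l1, l2, rfl, hl1⟩
      refine ⟨hc, x :: l1, l2, rfl, ?_⟩
      intro r hr
      rcases List.mem_cons.mp hr with rfl | hr
      · intro he; rw [he] at hx; rw [hx] at hc; exact absurd hc (by simp)
      · exact hl1 r hr
    · rw [if_neg hx] at h
      rcases List.mem_cons.mp h with rfl | h
      · exact ⟨by simpa using hx, [], t, rfl, by simp⟩
      · rcases ih _ q h with ⟨hc, l1, l2, rfl, hl1⟩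
        rw [pvContains_add] at hc
        have hc1 : PySem.Set.contains seen (PySem.Str.lower q.2.1) = false := by
          cases hcs : PySem.Set.contains seen (PySem.Str.lower q.2.1) <;> simp_all
        have hc2 : PySem.Str.lower q.2.1 ≠ PySem.Str.lower x.2.1 := by
          intro he; rw [he] at hc; simp at hc
        refine ⟨hc1, x :: l1, l2, rfl, ?_⟩
        intro r hr
        rcases List.mem_cons.mp hr with rfl | hr
        · exact fun he => hc2 he.symm
        · exact hl1 r hr

theorem pvFF_cls : ∀ (l : List (Int × (String × Int))) (seen : PySem.Set String),
    ((pvFF seen l).map (fun q => PySem.Str.lower q.2.1)).Nodup ∧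
      (∀ c, c ∈ (pvFF seen l).map (fun q => PySem.Str.lower q.2.1) ↔
        (c ∈ l.map (fun q => PySem.Str.lower q.2.1) ∧ PySem.Set.contains seen c = false)) := by
  intro l
  induction l with
  | nil => intro seen; simp [pvFF]
  | cons x t ih =>
    intro seen
    rw [pvFF]
    by_cases hx : PySem.Set.contains seen (PySem.Str.lower x.2.1) = true
    · rw [if_pos hx]
      rcases ih seen with ⟨hnd, hmem⟩
      refine ⟨hnd, fun c => ?_⟩
      rw [hmem c]
      constructor
      · rintro ⟨h1, h2⟩; exact ⟨by simp [h1], h2⟩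
      · rintro ⟨h1, h2⟩
        rw [List.map_cons] at h1
        rcases List.mem_cons.mp h1 with rfl | h1
        · rw [hx] at h2; exact absurd h2 (by simp)
        · exact ⟨h1, h2⟩
    · rw [if_neg hx]
      rcases ih (PySem.Set.add seen (PySem.Str.lower x.2.1)) with ⟨hnd, hmem⟩
      constructor
      · rw [List.map_cons]
        refine List.nodup_cons.mpr ⟨?_, hnd⟩
        intro hmm
        rcases (hmem _).mp hmm with ⟨_, h2⟩
        rw [pvContains_add] at h2
        simp at h2
      · intro c
        rw [List.map_cons, List.mem_cons, hmem c, pvContains_add]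
        constructor
        · rintro (rfl | ⟨h1, h2⟩)
          · exact ⟨by rw [List.map_cons]; exact List.mem_cons_self, by simpa using hx⟩
          · constructor
            · rw [List.map_cons]; exact List.mem_cons_of_mem _ h1
            · cases hcs : PySem.Set.contains seen c <;> simp_all
        · rintro ⟨h1, h2⟩
          rw [List.map_cons] at h1
          rcases List.mem_cons.mp h1 with rfl | h1
          · exact Or.inl rfl
          · by_cases hcx : c = PySem.Str.lower x.2.1
            · exact Or.inl hcx
            · refine Or.inr ⟨h1, ?_⟩
              have h3 : c ∉ seen := fun hm =>
                absurd h2 (by simp [PySem.Set.contains, List.contains_iff_mem, hm])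
              simp [pvContains_add] at *
              exact ⟨by simpa [PySem.Set.contains, List.contains_iff_mem] using h3, hcx⟩

-- ---- A's result characterised ----
theorem pvFoldA : ∀ (l : List (String × Int)) (seen : PySem.Set String)
    (res : PySem.Dict String Int) (cic : PySem.Dict String Int),
    (∀ k ∈ res.keys, PySem.Set.contains seen (PySem.Str.lower k) = true) →
    ((l.foldl
        (fun (st : PySem.Dict String Int × PySem.Set String) kv =>
          if PySem.Set.contains st.2 (PySem.Str.lower kv.1) then st
          else (st.1.insert kv.1 (cic.getD (PySem.Str.lower kv.1) 0),
                PySem.Set.add st.2 (PySem.Str.lower kv.1)))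
        (res, seen)).1).items
      = res.items ++ (pvFFs seen l).map (fun kv => (kv.1, cic.getD (PySem.Str.lower kv.1) 0)) := by
  intro l
  induction l with
  | nil => intro seen res cic hinv; simp [pvFFs]
  | cons kv t ih =>
    intro seen res cic hinv
    simp only [List.foldl_cons]
    by_cases h : PySem.Set.contains seen (PySem.Str.lower kv.1) = true
    · rw [if_pos h, ih seen res cic hinv, pvFFs, if_pos h]
    · rw [if_neg h]
      have hfresh : res.contains kv.1 = false := by
        cases hc : res.contains kv.1
        · rfl
        · have := hinv kv.1 ((PySem.Dict.contains_iff_mem_keys res kv.1).mp hc)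
          rw [this] at h; exact absurd rfl h
      have hinv' : ∀ k ∈ (res.insert kv.1 (cic.getD (PySem.Str.lower kv.1) 0)).keys,
          PySem.Set.contains (PySem.Set.add seen (PySem.Str.lower kv.1)) (PySem.Str.lower k) = true := by
        intro k hk
        rw [pvContains_add]
        rcases (PySem.Dict.mem_keys_insert _ _ _ _).mp hk with rfl | hk
        · simp
        · rw [hinv k hk]; simp
      rw [ih _ _ cic hinv']
      rw [PySem.Dict.items_insert_of_not_contains res _ hfresh]
      rw [pvFFs, if_neg h]
      simp

-- ---- B side: the groups fold characterised via get? ----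
def pvUpd (o : Option (Int × Int × Int × String)) (p : Int × (String × Int)) :
    Option (Int × Int × Int × String) :=
  some (match o with
        | none => (p.2.2, p.2.2, p.1, p.2.1)
        | some g => (g.1 + p.2.2, if g.2.1 < p.2.2 then (p.2.2, p.1, p.2.1) else g.2))

theorem pvFoldB_get? : ∀ (l : List (Int × (String × Int)))
    (d : PySem.Dict String (Int × Int × Int × String)) (c : String),
    (l.foldl
        (fun d p =>
          d.insert (PySem.Str.lower p.2.1)
            (match d.get? (PySem.Str.lower p.2.1) with
             | none => (p.2.2, p.2.2, p.1, p.2.1)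
             | some g => (g.1 + p.2.2, if g.2.1 < p.2.2 then (p.2.2, p.1, p.2.1) else g.2)))
        d).get? c
      = (l.filter (fun p => PySem.Str.lower p.2.1 == c)).foldl pvUpd (d.get? c) := by
  intro l
  induction l with
  | nil => intro d c; simp
  | cons p t ih =>
    intro d c
    simp only [List.foldl_cons]
    rw [ih]
    by_cases h : PySem.Str.lower p.2.1 = c
    · rw [List.filter_cons_of_pos (by simp [h])]
      simp only [List.foldl_cons]
      congr 1
      rw [PySem.Dict.get?_insert, if_pos h.symm, h]
      rfl
    · rw [List.filter_cons_of_neg (by simp [h])]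
      congr 1
      rw [PySem.Dict.get?_insert, if_neg (fun hc => h hc.symm)]

def pvMembers (xs : List (String × Int)) (c : String) : List (Int × (String × Int)) :=
  (PySem.List.enumerate xs 0).filter (fun p => PySem.Str.lower p.2.1 == c)

def pvRec (xs : List (String × Int)) (c : String) : Int × Int × Int × String :=
  ((pvMembers xs c).foldl pvUpd none).getD (0, 0, 0, "")

def pvBest (b : Int × (String × Int)) (t : List (Int × (String × Int))) : Int × (String × Int) :=
  t.foldl (fun b p => if b.2.2 < p.2.2 then p else b) b

theorem pvBest_cons (b p : Int × (String × Int)) (t : List (Int × (String × Int))) :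
    pvBest b (p :: t) = pvBest (if b.2.2 < p.2.2 then p else b) t := rfl

theorem pvG1 : ∀ (t : List (Int × (String × Int))) (tot : Int) (b : Int × (String × Int)),
    t.foldl pvUpd (some (tot, b.2.2, b.1, b.2.1))
      = some (tot + (t.map (fun p => p.2.2)).sum,
          (pvBest b t).2.2, (pvBest b t).1, (pvBest b t).2.1) := by
  intro t
  induction t with
  | nil => intro tot b; simp [pvBest]
  | cons p t ih =>
    intro tot b
    simp only [List.foldl_cons, pvBest_cons]
    by_cases h : b.2.2 < p.2.2
    · rw [if_pos h]
      have : pvUpd (some (tot, b.2.2, b.1, b.2.1)) p = some (tot + p.2.2, p.2.2, p.1, p.2.1) := by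
        simp [pvUpd, h]
      rw [this, ih]
      simp only [List.map_cons, List.sum_cons]
      congr 2
      ring
    · rw [if_neg h]
      have : pvUpd (some (tot, b.2.2, b.1, b.2.1)) p = some (tot + p.2.2, b.2.2, b.1, b.2.1) := by
        simp [pvUpd, h]
      rw [this, ih]
      simp only [List.map_cons, List.sum_cons]
      congr 2
      ring

theorem pvBest_mem : ∀ (t : List (Int × (String × Int))) (b : Int × (String × Int)),
    pvBest b t = b ∨ (pvBest b t ∈ t ∧ b.2.2 < (pvBest b t).2.2) := by
  intro t
  induction t with
  | nil => intro b; simp [pvBest]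
  | cons p t ih =>
    intro b
    rw [pvBest_cons]
    by_cases h : b.2.2 < p.2.2
    · rw [if_pos h]
      rcases ih p with h1 | ⟨h1, h2⟩
      · exact Or.inr ⟨by simp [h1], by rw [h1]; exact h⟩
      · exact Or.inr ⟨by simp [h1], by omega⟩
    · rw [if_neg h]
      rcases ih b with h1 | ⟨h1, h2⟩
      · exact Or.inl h1
      · exact Or.inr ⟨by simp [h1], h2⟩

theorem pvBest_max : ∀ (t : List (Int × (String × Int))) (b : Int × (String × Int)),
    b.2.2 ≤ (pvBest b t).2.2 ∧ ∀ p ∈ t, p.2.2 ≤ (pvBest b t).2.2 := by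
  intro t
  induction t with
  | nil => intro b; simp [pvBest]
  | cons p t ih =>
    intro b
    rw [pvBest_cons]
    by_cases h : b.2.2 < p.2.2
    · rw [if_pos h]
      rcases ih p with ⟨h1, h2⟩
      refine ⟨by omega, ?_⟩
      intro r hr
      rcases List.mem_cons.mp hr with rfl | hr
      · exact h1
      · exact h2 r hr
    · rw [if_neg h]
      rcases ih b with ⟨h1, h2⟩
      refine ⟨h1, ?_⟩
      intro r hr
      rcases List.mem_cons.mp hr with rfl | hr
      · omega
      · exact h2 r hr

theorem pvBest_earliest : ∀ (t : List (Int × (String × Int))) (b : Int × (String × Int)),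
    (∀ p ∈ t, b.1 < p.1) → t.Pairwise (fun p q => p.1 < q.1) →
    ∀ p, (p = b ∨ p ∈ t) → p ≠ pvBest b t →
      (p.2.2 < (pvBest b t).2.2 ∨ (pvBest b t).1 < p.1) := by
  intro t
  induction t with
  | nil =>
    intro b _ _ p hp hne
    rcases hp with rfl | hp
    · simp [pvBest] at hne
    · simp at hp
  | cons x t ih =>
    intro b hb hpw p hp hne
    rcases List.pairwise_cons.mp hpw with ⟨hx, ht⟩
    rw [pvBest_cons] at hne ⊢
    by_cases h : b.2.2 < x.2.2
    · rw [if_pos h] at hne ⊢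
      rcases hp with heq | hp
      · -- p = b
        left
        have h5 := (pvBest_max t x).1
        have h6 : p.2.2 = b.2.2 := by rw [heq]
        omega
      · rcases List.mem_cons.mp hp with heq | hp
        · exact ih x hx ht p (Or.inl heq) hne
        · exact ih x hx ht p (Or.inr hp) hne
    · rw [if_neg h] at hne ⊢
      have hb' : ∀ r ∈ t, b.1 < r.1 := by
        intro r hr; have := hb r (by simp [hr]); omega
      rcases hp with heq | hp
      · exact ih b hb' ht p (Or.inl heq) hne
      · rcases List.mem_cons.mp hp with heq | hp
        · -- p = x : show x.2.2 < best ∨ best.1 < x.1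
          rcases pvBest_mem t b with h1 | ⟨h1, h2⟩
          · right; rw [h1]; rw [heq]; exact hb x List.mem_cons_self
          · left
            have hx2 := hx (pvBest b t) h1
            have h7 : p.2.2 = x.2.2 := by rw [heq]
            omega
        · exact ih b hb' ht p (Or.inr hp) hne

-- ---- fact F: the representative picked by the grouping pass is the first element
--      of its class in the indexed lexicographic sort ----
theorem pvFactF (xs : List (String × Int)) :
    ∀ q ∈ pvFF PySem.Set.empty
        (PySem.List.sorted2 (PySem.List.enumerate xs 0) (fun p => -p.2.2) (fun p => p.1) false),
      pvRec xs (PySem.Str.lower q.2.1)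
        = (pvTot xs (PySem.Str.lower q.2.1), q.2.2, q.1, q.2.1) := by
  intro q hq
  set s2 := PySem.List.sorted2 (PySem.List.enumerate xs 0) (fun p => -p.2.2) (fun p => p.1) false with hs2
  set c := PySem.Str.lower q.2.1 with hc
  have hperm : s2.Perm (PySem.List.enumerate xs 0) :=
    PySem.List.sorted2_perm _ _ _ _
  have hfperm : (s2.filter (fun p => PySem.Str.lower p.2.1 == c)).Perm (pvMembers xs c) :=
    hperm.filter _
  have hqs2 : q ∈ s2 := (pvFF_sublist _ _).mem hq
  have hqf : q ∈ s2.filter (fun p => PySem.Str.lower p.2.1 == c) := by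
    rw [List.mem_filter]; exact ⟨hqs2, by simp [hc]⟩
  have hqm : q ∈ pvMembers xs c := hfperm.mem_iff.mp hqf
  -- q is lex-minimal among class members
  have hqmin : ∀ p ∈ pvMembers xs c, p ≠ q →
      pvBef (fun p => -p.2.2) (fun p => p.1) q p = true := by
    intro p hp hne
    have hpf : p ∈ s2.filter (fun p => PySem.Str.lower p.2.1 == c) := hfperm.mem_iff.mpr hp
    rcases List.mem_filter.mp hpf with ⟨hps2, hpc⟩
    rcases pvFF_first _ _ q hq with ⟨_, l1, l2, hdec, hl1⟩
    have hpl : p ∈ l1 ++ q :: l2 := by rw [← hdec]; exact hps2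
    have hpnotl1 : p ∉ l1 := by
      intro hmem
      exact hl1 p hmem (by simpa [hc] using (beq_iff_eq.mp hpc))
    have hpl2 : p ∈ l2 := by
      rcases List.mem_append.mp hpl with h1 | h2
      · exact absurd h1 hpnotl1
      · rcases List.mem_cons.mp h2 with rfl | h2
        · exact absurd rfl hne
        · exact h2
    -- pairwise facts of s2 between q and p
    have hpw := pvSorted2_pairwise (PySem.List.enumerate xs 0)
        (fun p : Int × (String × Int) => -p.2.2) (fun p => p.1)
    rw [← hs2, hdec] at hpw
    have hqp := (List.pairwise_append.mp hpw).2.1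
    rcases List.pairwise_cons.mp hqp with ⟨hqall, _⟩
    have hbef : pvBef (fun p : Int × (String × Int) => -p.2.2) (fun p => p.1) p q = false :=
      hqall p hpl2
    -- indices distinct
    have hne_idx : p.1 ≠ q.1 := by
      have hepw := pvEnum_pairwise_lt xs 0
      have hne' : s2.Pairwise (fun a b => a.1 ≠ b.1) := by
        refine (hperm.pairwise_iff (fun h => h.symm)).mpr ?_
        exact hepw.imp (fun h => by omega)
      rw [hdec] at hne'
      have := (List.pairwise_append.mp hne').2.1
      rcases List.pairwise_cons.mp this with ⟨hqall2, _⟩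
      exact fun he => (hqall2 p hpl2) he.symm
    exact pvBef_total _ _ hbef (by simpa using hne_idx)
  -- class members are nonempty: destruct
  rcases hm : pvMembers xs c with _ | ⟨m, t⟩
  · rw [hm] at hqm; simp at hqm
  -- index structure of the member list
  have hmem_pw : (pvMembers xs c).Pairwise (fun p q => p.1 < q.1) := by
    unfold pvMembers
    exact List.Pairwise.sublist List.filter_sublist (pvEnum_pairwise_lt xs 0)
  rw [hm] at hmem_pw
  rcases List.pairwise_cons.mp hmem_pw with ⟨hmall, htpw⟩
  -- compute the fold
  have hfold : (pvMembers xs c).foldl pvUpd none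
      = some (m.2.2 + (t.map (fun p => p.2.2)).sum,
          (pvBest m t).2.2, (pvBest m t).1, (pvBest m t).2.1) := by
    rw [hm]
    simp only [List.foldl_cons]
    have : pvUpd none m = some (m.2.2, m.2.2, m.1, m.2.1) := by simp [pvUpd]
    rw [this, pvG1]
  -- best = q
  have hbq : pvBest m t = q := by
    by_contra hne
    have hbmem : pvBest m t ∈ pvMembers xs c := by
      rw [hm]
      rcases pvBest_mem t m with h1 | ⟨h1, _⟩
      · rw [h1]; simp
      · simp [h1]
    have h1 : pvBef (fun p => -p.2.2) (fun p => p.1) q (pvBest m t) = true :=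
      hqmin _ hbmem hne
    -- q is among members; best is lex-min among members too
    have hqmem' : q = m ∨ q ∈ t := by
      rw [hm] at hqm; exact List.mem_cons.mp hqm
    have hqbest : q ≠ pvBest m t := fun he => hne he.symm
    have h2 := pvBest_earliest t m hmall htpw q hqmem' hqbest
    have h3 := pvBest_max t m
    -- show pvBef best q = true, contradiction with asymm
    have hb2 : pvBef (fun p => -p.2.2) (fun p => p.1) (pvBest m t) q = true := by
      simp only [pvBef]
      rcases h2 with h2 | h2
      · simp; omega
      · have hqle : q.2.2 ≤ (pvBest m t).2.2 := by
          rcases hqmem' with rfl | hqt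
          · exact h3.1
          · exact h3.2 q hqt
        simp; omega
    have h9 := pvBef_asymm _ _ h1
    rw [h9] at hb2; exact Bool.false_ne_true hb2
  -- totals agree
  have htot : m.2.2 + (t.map (fun p => p.2.2)).sum = pvTot xs c := by
    have : ((pvMembers xs c).map (fun p => p.2.2)).sum = pvTot xs c := by
      unfold pvMembers pvTot
      rw [pvEnum_filter_map]
    rw [hm] at this
    simpa using this
  unfold pvRec
  rw [hfold, hbq, htot]
  rfl

-- ---- B's groups dict: keys and lookups ----
theorem pvFoldB_keys (xs : List (String × Int)) :
    ((PySem.List.enumerate xs 0).foldl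
        (fun d p =>
          d.insert (PySem.Str.lower p.2.1)
            (match d.get? (PySem.Str.lower p.2.1) with
             | none => (p.2.2, p.2.2, p.1, p.2.1)
             | some g => (g.1 + p.2.2, if g.2.1 < p.2.2 then (p.2.2, p.1, p.2.1) else g.2)))
        (PySem.Dict.empty : PySem.Dict String (Int × Int × Int × String))).keys
      = PySem.Set.ofList ((PySem.List.enumerate xs 0).map (fun p => PySem.Str.lower p.2.1)) := by
  rw [PySem.Dict.keys_foldl_insert_key
      (key := fun p : Int × (String × Int) => PySem.Str.lower p.2.1)]
  rw [PySem.Dict.keys_empty]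
  rfl


-- ---- assembly ----
def pvS2 (xs : List (String × Int)) : List (Int × (String × Int)) :=
  PySem.List.sorted2 (PySem.List.enumerate xs 0) (fun p => -p.2.2) (fun p => p.1) false

theorem pvCic (xs : List (String × Int)) (c : String) :
    (xs.foldl (fun d kv => d.modify (PySem.Str.lower kv.1) 0 (fun t => t + kv.2))
        PySem.Dict.empty).getD c 0 = pvTot xs c := by
  rw [pvGetD_foldl_modify]
  simp [pvTot]

theorem pvA_char (xs : List (String × Int)) :
    get_distinct_count xs
      = (pvFF PySem.Set.empty (pvS2 xs)).map
          (fun q => (q.2.1, pvTot xs (PySem.Str.lower q.2.1))) := by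
  simp only [get_distinct_count]
  rw [pvFoldA _ _ _ _ (by simp [PySem.Dict.keys_empty])]
  rw [pvStability xs]
  rw [pvFFs_map_snd]
  show ((pvFF PySem.Set.empty (pvS2 xs)).map Prod.snd).map _ = _
  rw [List.map_map]
  refine List.map_congr_left ?_
  intro q _
  simp only [Function.comp]
  rw [pvCic]

theorem pvGroups_get? (xs : List (String × Int)) (c : String) :
    ((PySem.List.enumerate xs 0).foldl
        (fun d p =>
          d.insert (PySem.Str.lower p.2.1)
            (match d.get? (PySem.Str.lower p.2.1) with
             | none => (p.2.2, p.2.2, p.1, p.2.1)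
             | some g => (g.1 + p.2.2, if g.2.1 < p.2.2 then (p.2.2, p.1, p.2.1) else g.2)))
        (PySem.Dict.empty : PySem.Dict String (Int × Int × Int × String))).get? c
      = (pvMembers xs c).foldl pvUpd none := by
  rw [pvFoldB_get?]
  rw [PySem.Dict.get?_empty]
  rfl

theorem pvGroups_values (xs : List (String × Int)) :
    PySem.Dict.values
        ((PySem.List.enumerate xs 0).foldl
          (fun d p =>
            d.insert (PySem.Str.lower p.2.1)
              (match d.get? (PySem.Str.lower p.2.1) with
               | none => (p.2.2, p.2.2, p.1, p.2.1)
               | some g => (g.1 + p.2.2, if g.2.1 < p.2.2 then (p.2.2, p.1, p.2.1) else g.2)))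
          (PySem.Dict.empty : PySem.Dict String (Int × Int × Int × String)))
      = (PySem.Set.ofList ((PySem.List.enumerate xs 0).map (fun p => PySem.Str.lower p.2.1))).map
          (pvRec xs) := by
  have hnd : ((PySem.List.enumerate xs 0).foldl
      (fun d p =>
        d.insert (PySem.Str.lower p.2.1)
          (match d.get? (PySem.Str.lower p.2.1) with
           | none => (p.2.2, p.2.2, p.1, p.2.1)
           | some g => (g.1 + p.2.2, if g.2.1 < p.2.2 then (p.2.2, p.1, p.2.1) else g.2)))
      (PySem.Dict.empty : PySem.Dict String (Int × Int × Int × String))).keys.Nodup := by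
    exact PySem.Dict.nodup_keys_foldl_insert_key _
      (fun p : Int × (String × Int) => PySem.Str.lower p.2.1) _ _ PySem.Dict.nodup_keys_empty
  rw [PySem.Dict.values_eq_map_keys _ hnd (0, 0, 0, "")]
  rw [pvFoldB_keys]
  refine List.map_congr_left ?_
  intro c _
  rw [PySem.Dict.getD_eq_get?_getD, pvGroups_get? xs c]
  rfl

theorem pvS2_pairwise_strict (xs : List (String × Int)) :
    (pvS2 xs).Pairwise (fun a b => pvBef (fun p => -p.2.2) (fun p => p.1) a b = true) := by
  have hperm : (pvS2 xs).Perm (PySem.List.enumerate xs 0) := PySem.List.sorted2_perm _ _ _ _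
  have hle := pvSorted2_pairwise (PySem.List.enumerate xs 0)
      (fun p : Int × (String × Int) => -p.2.2) (fun p => p.1)
  have hne : (pvS2 xs).Pairwise (fun a b => a.1 ≠ b.1) :=
    (hperm.pairwise_iff (fun h => h.symm)).mpr
      ((pvEnum_pairwise_lt xs 0).imp (fun h => by omega))
  exact (hle.and hne).imp (fun h => pvBef_total _ _ h.1 (Ne.symm h.2))

theorem pvS2_pairwise_ne (xs : List (String × Int)) :
    (pvS2 xs).Pairwise (fun a b => a.1 ≠ b.1) := by
  have hperm : (pvS2 xs).Perm (PySem.List.enumerate xs 0) := PySem.List.sorted2_perm _ _ _ _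
  exact (hperm.pairwise_iff (fun h => h.symm)).mpr
      ((pvEnum_pairwise_lt xs 0).imp (fun h => by omega))

theorem pvCrown (xs : List (String × Int)) :
    PySem.List.sorted2
        ((PySem.Set.ofList ((PySem.List.enumerate xs 0).map (fun p => PySem.Str.lower p.2.1))).map
          (pvRec xs))
        (fun g => -g.2.1) (fun g => g.2.2.1) false
      = (pvFF PySem.Set.empty (pvS2 xs)).map (fun q => pvRec xs (PySem.Str.lower q.2.1)) := by
  have hFF := pvFactF xs
  have hclsnd := (pvFF_cls (pvS2 xs) PySem.Set.empty).1
  have hclsmem := (pvFF_cls (pvS2 xs) PySem.Set.empty).2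
  have hperm : (pvS2 xs).Perm (PySem.List.enumerate xs 0) := PySem.List.sorted2_perm _ _ _ _
  apply pvSorted2_uniq
  · -- permutation with the values list
    have hclsperm :
        ((pvFF PySem.Set.empty (pvS2 xs)).map (fun q => PySem.Str.lower q.2.1)).Perm
          (PySem.Set.ofList ((PySem.List.enumerate xs 0).map (fun p => PySem.Str.lower p.2.1))) := by
      rw [List.perm_ext_iff_of_nodup hclsnd (PySem.Set.nodup_ofList _)]
      intro c
      rw [hclsmem c, PySem.Set.mem_ofList]
      constructor
      · rintro ⟨h1, _⟩
        exact (List.Perm.mem_iff (hperm.map _)).mp h1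
      · intro h1
        exact ⟨(List.Perm.mem_iff (hperm.map _)).mpr h1,
          by simp [PySem.Set.contains, PySem.Set.empty]⟩
    have := hclsperm.map (pvRec xs)
    rw [List.map_map] at this
    exact this
  · -- pairwise strictly "before"
    rw [List.pairwise_map]
    refine List.Pairwise.imp_of_mem ?_
      (List.Pairwise.sublist (pvFF_sublist _ _) (pvS2_pairwise_strict xs))
    intro a b ha hb hab
    rw [hFF a ha, hFF b hb]
    simpa [pvBef] using hab
  · -- second keys pairwise distinct
    rw [List.pairwise_map]
    refine List.Pairwise.imp_of_mem ?_
      (List.Pairwise.sublist (pvFF_sublist _ _) (pvS2_pairwise_ne xs))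
    intro a b ha hb hab
    rw [hFF a ha, hFF b hb]
    simpa using hab

theorem pvB_char (xs : List (String × Int)) :
    get_distinct_count_alt xs
      = (pvFF PySem.Set.empty (pvS2 xs)).map
          (fun q => (q.2.1, pvTot xs (PySem.Str.lower q.2.1))) := by
  simp only [get_distinct_count_alt]
  rw [pvGroups_values xs, pvCrown xs]
  have hFF := pvFactF xs
  have hbk : ((pvFF PySem.Set.empty (pvS2 xs)).map (fun q => pvRec xs (PySem.Str.lower q.2.1))).map
      (fun g => g.2.2.2) = (pvFF PySem.Set.empty (pvS2 xs)).map (fun q => q.2.1) := by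
    rw [List.map_map]
    refine List.map_congr_left ?_
    intro q hq
    simp only [Function.comp]
    rw [hFF q hq]
  have hnodup : (((pvFF PySem.Set.empty (pvS2 xs)).map (fun q => pvRec xs (PySem.Str.lower q.2.1))).map
      (fun g => g.2.2.2)).Nodup := by
    rw [hbk]
    refine List.Nodup.of_map PySem.Str.lower ?_
    rw [List.map_map]
    exact (pvFF_cls (pvS2 xs) PySem.Set.empty).1
  rw [PySem.Dict.items_foldl_insert_fresh _ _ _ _ (fun a _ => PySem.Dict.contains_empty _) hnodup]
  rw [List.map_map]
  have hemp : (PySem.Dict.empty : PySem.Dict String Int).items = [] := rfl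
  rw [hemp, List.nil_append]
  refine List.map_congr_left ?_
  intro q hq
  simp only [Function.comp]
  rw [hFF q hq]

-- ===== VERDICT (by name: the statement is the Claim_ definition above) =====
theorem get_distinct_count_spec : Claim_equal_get_distinct_count := by
  intro xs _ _
  unfold Spec_get_distinct_count
  rw [pvA_char xs, pvB_char xs]
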